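-- pv_equiv track=rewrite | github.com/joshanashakya/dissertation | workspace/dataset/java-python/GeeksForGeeks/1990/A/2.py | maxGcd
-- ===== SOURCE A (Python) =====
-- from math import gcd, sqrt
--
-- def countBits(n):
--
--     # Base case
--     if (n == 0):
--         return 0
--
--     # unset bit count
--     else:
--         return (((n & 1) == 0) +
--                   countBits(n >> 1))
--
-- def maxGcd(n):
--
--     # If no unset bits
--     if (countBits(n) == 0):
--
--         # Find the maximum factor
--         for i in range(2, int(sqrt(n)) + 1):
--
--             # Highest factor
--             if (n % i == 0):
--                 return int(n / i)
--
--     else: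
--         val = 0
--         power = 1
--         dupn = n
--
--         # Find the flipped bit number
--         while (n):
--
--             # If bit is not set
--             if ((n & 1) == 0):
--                 val += power
--
--             # Next power of 2
--             power = power * 2
--
--             # Right shift the number
--             n = n >> 1
--
--         # Return the answer
--         return gcd(val ^ dupn, val & dupn)
--
--     # If a prime number
--     return 1
-- ===== SOURCE B (Python) =====
-- from math import sqrt
--
--
-- def maxGcd(n):
--     # full = smallest all-ones number covering n's bits
--     full = (1 << n.bit_length()) - 1
--     if n == full:
--         # n is all ones: answer is n divided by its smallest prime factor
--         for i in range(2, int(sqrt(n)) + 1):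
--             if n % i == 0:
--                 return n // i
--         return 1
--     return full
-- ===== Notes on version B (the rewrite author's own statement) =====
-- stated objective: simpler
-- what changed: B replaces the recursive countBits helper and the bit-accumulating while-loop by a closed form (one less than two to the bit_length), used both as the all-ones test and as the else-branch answer; only the trial-division search for all-ones inputs remains a loop.
import Mathlib
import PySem

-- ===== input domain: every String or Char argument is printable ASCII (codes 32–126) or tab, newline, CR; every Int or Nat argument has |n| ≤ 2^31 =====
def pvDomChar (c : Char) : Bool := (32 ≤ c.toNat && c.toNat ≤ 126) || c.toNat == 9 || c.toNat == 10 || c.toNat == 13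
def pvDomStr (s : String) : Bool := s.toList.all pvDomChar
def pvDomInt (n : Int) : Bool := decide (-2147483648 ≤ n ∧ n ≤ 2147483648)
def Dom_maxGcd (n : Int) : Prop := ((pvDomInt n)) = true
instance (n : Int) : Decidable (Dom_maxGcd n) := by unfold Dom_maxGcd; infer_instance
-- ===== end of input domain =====

-- B replaces A's recursive countBits test and bit-accumulating while-loop by the closed form
-- (1 << n.bit_length()) - 1 (objective: simpler). For n < 0 A raises RecursionError (excluded by Pre_).

-- ===== PORT A =====
-- countBits(n): on Pre_ (0 ≤ n) the argument stays a Nat; n >> 1 is /2, (n & 1) == 0 is n % 2 = 0,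
-- and Python's bool-int addition makes the summand 1 or 0.
def countBits : Nat → Nat
  | 0 => 0
  | m + 1 => (if (m + 1) % 2 = 0 then 1 else 0) + countBits ((m + 1) / 2)
  decreasing_by omega

-- the for-loop with early return; int(n / i) is exact here (i divides n, 0 ≤ n ≤ 2^31 < 2^53) = n // i
def trialA (n : Int) : List Int → Option Int
  | [] => none
  | i :: rest => if PySem.Int.mod n i = 0 then some (PySem.Int.floordiv n i) else trialA n rest

-- the while-loop; all of val, power, n are nonnegative ints on Pre_
def whileA : Nat → Nat → Nat → Nat
  | 0, val, _ => val
  | m + 1, val, power =>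
      whileA ((m + 1) / 2) (if (m + 1) % 2 = 0 then val + power else val) (power * 2)
  decreasing_by omega

def maxGcd (n : Int) : Int :=
  if countBits n.toNat = 0 then
    -- int(sqrt(n)) is exactly Nat.sqrt on the domain 0 ≤ n ≤ 2^31 (double sqrt is correctly rounded)
    match trialA n (PySem.List.pyRange 2 ((Nat.sqrt n.toNat : Int) + 1) 1) with
    | some v => v
    | none => 1
  else
    let val := whileA n.toNat 0 1
    ((Nat.gcd (val ^^^ n.toNat) (val &&& n.toNat) : Nat) : Int)

-- ===== PORT B =====
def maxGcd_alt (n : Int) : Int :=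
  let full : Int := (1 <<< PySem.Int.bitLength n) - 1
  if n = full then
    -- int(sqrt(n)) is exactly Nat.sqrt on the domain 0 ≤ n ≤ 2^31
    match (PySem.List.pyRange 2 ((Nat.sqrt n.toNat : Int) + 1) 1).find?
            (fun i => PySem.Int.mod n i == 0) with
    | some i => PySem.Int.floordiv n i
    | none => 1
  else full

-- ===== PRECONDITION & SPEC =====
-- A's countBits recurses forever (RecursionError) for n < 0, so Pre_ admits exactly the nonnegative inputs.
def Pre_maxGcd (n : Int) : Prop := 0 ≤ n
instance (n : Int) : Decidable (Pre_maxGcd n) := by unfold Pre_maxGcd; infer_instance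
def pvWitness_maxGcd : Int := 7

def Spec_maxGcd (n : Int) (out : Int) : Prop := out = maxGcd_alt n
instance (n : Int) (out : Int) : Decidable (Spec_maxGcd n out) := by unfold Spec_maxGcd; infer_instance

-- ===== CLAIM (what is proved, stated in full; the proofs are below) =====
def Claim_equal_maxGcd : Prop := ∀ (n : Int), Dom_maxGcd n → Pre_maxGcd n → Spec_maxGcd n (maxGcd n)

-- ===== LEMMAS AND PROOFS =====

-- proof-side bit length on Nat, matching Python's bit_length halving recurrence
def bl : Nat → Nat
  | 0 => 0
  | m + 1 => bl ((m + 1) / 2) + 1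
  decreasing_by omega

theorem bl_eq (m : Nat) : PySem.Int.bitLength (m : Int) = bl m := by
  induction m using bl.induct with
  | case1 => simp [bl]
  | case2 m ih =>
    rw [PySem.Int.bitLength_natCast (show 0 < m + 1 by omega), ih, bl]

theorem lt_two_pow_bl (m : Nat) : m < 2 ^ bl m := by
  induction m using bl.induct with
  | case1 => simp [bl]
  | case2 m ih =>
    rw [bl, pow_succ]
    omega

theorem countBits_eq_zero_iff (m : Nat) : countBits m = 0 ↔ m = 2 ^ bl m - 1 := by
  induction m using countBits.induct with
  | case1 => simp [countBits, bl]
  | case2 m ih =>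
    rw [countBits, bl, pow_succ]
    have h1 : 1 ≤ 2 ^ bl ((m + 1) / 2) := Nat.one_le_two_pow
    rcases Nat.even_or_odd (m + 1) with h | h
    · have hp : (m + 1) % 2 = 0 := Nat.even_iff.mp h
      rw [if_pos hp]
      constructor
      · omega
      · intro he; omega
    · have hp : (m + 1) % 2 = 1 := Nat.odd_iff.mp h
      rw [if_neg (by omega), Nat.zero_add, ih]
      omega

-- complement value accumulated by the while-loop
def gfun : Nat → Nat
  | 0 => 0
  | m + 1 => (if (m + 1) % 2 = 0 then 1 else 0) + 2 * gfun ((m + 1) / 2)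
  decreasing_by omega

theorem whileA_eq (m : Nat) : ∀ val power, whileA m val power = val + power * gfun m := by
  induction m using gfun.induct with
  | case1 => intro val power; simp [whileA, gfun]
  | case2 m ih =>
    intro val power
    rw [whileA, gfun, ih]
    split <;> ring

theorem testBit_gfun (m : Nat) : ∀ i, (gfun m).testBit i = (decide (i < bl m) && !(m.testBit i)) := by
  induction m using gfun.induct with
  | case1 => intro i; simp [gfun, bl]
  | case2 m ih =>
    intro i
    rw [gfun, bl]
    rcases i with _ | i
    · rw [Nat.testBit_zero, Nat.testBit_zero]
      rcases Nat.even_or_odd (m + 1) with h | h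
      · have hp : (m + 1) % 2 = 0 := Nat.even_iff.mp h
        simp only [hp]
        have : (1 + 2 * gfun ((m + 1) / 2)) % 2 = 1 := by omega
        simp [this]
      · have hp : (m + 1) % 2 = 1 := Nat.odd_iff.mp h
        rw [if_neg (by omega)]
        simp [hp]
    · rw [Nat.testBit_add_one, Nat.testBit_add_one]
      have hd : ((if (m + 1) % 2 = 0 then 1 else 0) + 2 * gfun ((m + 1) / 2)) / 2
          = gfun ((m + 1) / 2) := by split <;> omega
      rw [hd, ih]
      simp

theorem gfun_xor (m : Nat) : gfun m ^^^ m = 2 ^ bl m - 1 := by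
  apply Nat.eq_of_testBit_eq
  intro i
  rw [Nat.testBit_xor, testBit_gfun, Nat.testBit_two_pow_sub_one]
  by_cases h : i < bl m
  · simp only [h, decide_true, Bool.true_and]
    cases m.testBit i <;> rfl
  · have hf : m.testBit i = false :=
      Nat.testBit_lt_two_pow (lt_of_lt_of_le (lt_two_pow_bl m)
        (Nat.pow_le_pow_right (by omega) (Nat.le_of_not_lt h)))
    simp [h, hf]

theorem gfun_land (m : Nat) : gfun m &&& m = 0 := by
  apply Nat.eq_of_testBit_eq
  intro i
  rw [Nat.testBit_and, testBit_gfun]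
  cases m.testBit i <;> simp

theorem trial_eq (n : Int) (l : List Int) :
    (match trialA n l with | some v => v | none => 1) =
    (match l.find? (fun i => PySem.Int.mod n i == 0) with
      | some i => PySem.Int.floordiv n i | none => (1 : Int)) := by
  induction l with
  | nil => simp [trialA]
  | cons i rest ih =>
    by_cases h : PySem.Int.mod n i = 0
    · simp [trialA, List.find?, h]
    · simp only [trialA, List.find?, if_neg h]
      rw [show ((PySem.Int.mod n i == 0) = false) from by simpa using h]
      exact ih

-- ===== VERDICT (by name: the statement is the Claim_ definition above) =====
theorem maxGcd_spec : Claim_equal_maxGcd := by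
  intro n _ hpre
  unfold Spec_maxGcd
  lift n to Nat using hpre with m
  have h1 : 1 ≤ 2 ^ bl m := Nat.one_le_two_pow
  have hsh : (1 : Nat) <<< PySem.Int.bitLength (m : Int) = 2 ^ bl m := by
    rw [bl_eq, Nat.one_shiftLeft]
  have hcond : ((m : Int) = ((1 <<< PySem.Int.bitLength (m : Int) : Nat) : Int) - 1) ↔
      m = 2 ^ bl m - 1 := by
    rw [hsh]; omega
  simp only [maxGcd, maxGcd_alt, Int.toNat_natCast]
  by_cases hc : countBits m = 0
  · rw [if_pos hc, if_pos (hcond.mpr ((countBits_eq_zero_iff m).mp hc))]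
    exact trial_eq (m : Int) _
  · rw [if_neg hc, if_neg (fun h => hc ((countBits_eq_zero_iff m).mpr (hcond.mp h)))]
    rw [show whileA m 0 1 = gfun m from by rw [whileA_eq]; ring]
    rw [gfun_xor, gfun_land, Nat.gcd_zero_right, hsh]
    omega
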